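-- pv_equiv track=rewrite | github.com/Astrimedes/grendel_rl | substrings.py | strleft
-- ===== SOURCE A (Python) =====
-- def strleft(text, substring):
--     #index of substr
--     idx_match = 0
--     for i in range(0, len(text)):
--         if text[i] == substring[idx_match]:
--             idx_match += 1
--             if idx_match >= len(substring):
--                 #slice to just before substr
--                 return text[0:i-len(substring)+1]
--     return text
-- ===== SOURCE B (Python) =====
-- def strleft(text, substring):
--     # Walk the SUBSTRING, advancing a cursor in text with str.find;
--     # the greedy leftmost subsequence match coincides with A's scan of text.
--     pos = 0
--     for c in substring:
--         j = text.find(c, pos)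
--         if j == -1:
--             return text
--         pos = j + 1
--     return text[0:pos - len(substring)]
-- ===== Notes on version B (the rewrite author's own statement) =====
-- stated objective: alternative
-- what changed: B iterates over the substring's characters with a str.find cursor into text instead of A's character-by-character scan of text with a match index, and computes the slice bound from the final cursor position.
-- outside the precondition, e.g. on strleft('abc', ''): A raises IndexError, B returns ''
import Mathlib
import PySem

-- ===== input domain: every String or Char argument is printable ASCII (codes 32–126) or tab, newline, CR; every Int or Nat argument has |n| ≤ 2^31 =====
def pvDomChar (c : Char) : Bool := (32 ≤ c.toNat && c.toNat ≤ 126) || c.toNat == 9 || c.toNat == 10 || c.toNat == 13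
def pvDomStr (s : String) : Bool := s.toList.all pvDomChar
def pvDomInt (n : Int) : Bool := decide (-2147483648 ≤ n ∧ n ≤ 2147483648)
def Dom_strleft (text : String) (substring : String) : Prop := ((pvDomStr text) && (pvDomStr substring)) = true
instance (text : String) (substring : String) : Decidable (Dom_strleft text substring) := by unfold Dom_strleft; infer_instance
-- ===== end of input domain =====

-- B walks the SUBSTRING with a str.find cursor instead of A's scan of the text; same greedy
-- leftmost subsequence match, a different decomposition (objective: alternative, not faster).

-- ===== PORT A =====
-- state: remaining text characters, current text index i, current idx_match.
def strleftA_loop (sub : List Char) (text : String) : List Char → Nat → Nat → String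
  | [], _, _ => text
  | c :: rest, i, idx =>
    match PySem.List.pyGet? sub (idx : Int) with
    | none => ""   -- Python IndexError (substring exhausted); excluded by Pre_strleft
    | some d =>
      if c = d then
        if idx + 1 ≥ sub.length then
          PySem.Str.slice text (some 0) (some ((i : Int) - (sub.length : Int) + 1))
        else strleftA_loop sub text rest (i + 1) (idx + 1)
      else strleftA_loop sub text rest (i + 1) idx

def strleft (text : String) (substring : String) : String :=
  strleftA_loop substring.toList text text.toList 0 0

-- ===== PORT B =====
-- for c in substring: j = text.find(c, pos); if j == -1: return text (none); pos = j + 1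
def strleftB_loop (text : String) : List Char → Int → Option Int
  | [], pos => some pos
  | c :: rest, pos =>
    let j := PySem.Str.findFrom text (String.ofList [c]) pos
    if j = -1 then none else strleftB_loop text rest (j + 1)

def strleft_alt (text : String) (substring : String) : String :=
  match strleftB_loop text substring.toList 0 with
  | none => text
  | some pos => PySem.Str.slice text (some 0) (some (pos - (substring.toList.length : Int)))

-- ===== PRECONDITION & SPEC =====
-- Pre_ excludes exactly the inputs where A raises IndexError: empty substring with non-empty
-- text (substring[0] is evaluated on the first loop iteration); B returns '' there.
def Pre_strleft (text : String) (substring : String) : Prop := substring ≠ "" ∨ text = ""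
instance (text : String) (substring : String) : Decidable (Pre_strleft text substring) := by
  unfold Pre_strleft; infer_instance

def pvWitness_strleft : String × String := ("abcab", "ca")

def Spec_strleft (text : String) (substring : String) (out : String) : Prop := out = strleft_alt text substring
instance (text : String) (substring : String) (out : String) : Decidable (Spec_strleft text substring out) := by unfold Spec_strleft; infer_instance

-- ===== CLAIM (what is proved, stated in full; the proofs are below) =====
def Claim_equal_strleft : Prop := ∀ (text : String) (substring : String), Dom_strleft text substring → Pre_strleft text substring → Spec_strleft text substring (strleft text substring)

-- ===== LEMMAS AND PROOFS =====

theorem singleton_infix_iff_mem (c : Char) (l : List Char) : [c] <:+: l ↔ c ∈ l := by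
  constructor
  · intro h; simpa using h.sublist
  · intro h; obtain ⟨s, t, rfl⟩ := List.append_of_mem h; exact ⟨s, t, by simp⟩

theorem singleton_prefix_iff (c : Char) (l : List Char) : [c] <+: l ↔ ∃ r, l = c :: r := by
  constructor
  · rintro ⟨r, rfl⟩; exact ⟨r, rfl⟩
  · rintro ⟨r, rfl⟩; exact ⟨r, rfl⟩

theorem find_singleton_cons_self (c : Char) (r : List Char) :
    PySem.Chars.find (c :: r) [c] = 0 := by
  have hnn : 0 ≤ PySem.Chars.find (c :: r) [c] := by
    rw [PySem.Chars.find_nonneg_iff, singleton_infix_iff_mem]; exact List.mem_cons_self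
  obtain ⟨hpre, hmin⟩ := PySem.Chars.find_spec hnn
  by_contra hne
  have hlt : 0 < (PySem.Chars.find (c :: r) [c]).toNat := by omega
  exact hmin 0 hlt ⟨r, rfl⟩

theorem find_singleton_cons_ne (c x : Char) (r : List Char) (hx : x ≠ c) :
    PySem.Chars.find (x :: r) [c] =
      if PySem.Chars.find r [c] = -1 then -1 else 1 + PySem.Chars.find r [c] := by
  by_cases hm : c ∈ r
  · have hnr : 0 ≤ PySem.Chars.find r [c] := by
      rw [PySem.Chars.find_nonneg_iff, singleton_infix_iff_mem]; exact hm
    have hnl : 0 ≤ PySem.Chars.find (x :: r) [c] := by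
      rw [PySem.Chars.find_nonneg_iff, singleton_infix_iff_mem]; exact List.mem_cons_of_mem _ hm
    obtain ⟨hpreL, hminL⟩ := PySem.Chars.find_spec hnl
    obtain ⟨hpreR, hminR⟩ := PySem.Chars.find_spec hnr
    set M := (PySem.Chars.find (x :: r) [c]).toNat with hM
    set N := (PySem.Chars.find r [c]).toNat with hN
    have hMne : M ≠ 0 := by
      intro h0
      rw [h0, List.drop_zero, singleton_prefix_iff] at hpreL
      obtain ⟨r', hr'⟩ := hpreL
      exact hx (by injection hr')
    have hdropL : (x :: r).drop M = r.drop (M - 1) := by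
      rw [show M = (M - 1) + 1 from by omega]
      simp
    rw [hdropL] at hpreL
    have hNle : N ≤ M - 1 := by
      by_contra hgt
      exact hminR (M - 1) (by omega) hpreL
    have hMle : M ≤ N + 1 := by
      by_contra hgt
      exact hminL (N + 1) (by omega) (by simpa using hpreR)
    have : M = N + 1 := by omega
    have hr : ¬ PySem.Chars.find r [c] = -1 := by omega
    rw [if_neg hr]; omega
  · have h1 : PySem.Chars.find r [c] = -1 := by
      rw [PySem.Chars.find_eq_neg_one_iff, singleton_infix_iff_mem]; exact hm
    have h2 : PySem.Chars.find (x :: r) [c] = -1 := by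
      rw [PySem.Chars.find_eq_neg_one_iff, singleton_infix_iff_mem]
      simp [hx.symm, hm]
    rw [h2, h1, if_pos rfl]

-- findFrom facts for a single-character needle, at a start inside the text
theorem findFrom_at_end (l : List Char) (c : Char) (i : Nat) (hi : i ≤ l.length)
    (h : l.drop i = []) : PySem.Chars.findFrom l [c] (i : Int) = -1 := by
  rw [PySem.Chars.findFrom_natCast l [c] i hi, h]
  have : PySem.Chars.find ([] : List Char) [c] = -1 := by
    rw [PySem.Chars.find_eq_neg_one_iff, singleton_infix_iff_mem]; simp
  rw [this, if_pos rfl]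

theorem findFrom_hit (l : List Char) (c : Char) (i : Nat) (hi : i ≤ l.length)
    (rest : List Char) (h : l.drop i = c :: rest) :
    PySem.Chars.findFrom l [c] (i : Int) = (i : Int) := by
  rw [PySem.Chars.findFrom_natCast l [c] i hi, h, find_singleton_cons_self]
  simp

theorem findFrom_skip (l : List Char) (c x : Char) (i : Nat) (hi : i ≤ l.length)
    (rest : List Char) (h : l.drop i = x :: rest) (hx : x ≠ c) :
    PySem.Chars.findFrom l [c] (i : Int) = PySem.Chars.findFrom l [c] ((i : Int) + 1) := by
  have hlt : i < l.length := by
    by_cases hge : l.length ≤ i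
    · rw [List.drop_eq_nil_of_le hge] at h
      exact absurd h (by simp)
    · omega
  have hrest : l.drop (i + 1) = rest := by
    rw [← List.drop_drop, h]; simp
  have h1 : ((i : Int) + 1) = ((i + 1 : Nat) : Int) := by push_cast; ring
  rw [PySem.Chars.findFrom_natCast l [c] i hi, h, find_singleton_cons_ne c x rest hx, h1,
    PySem.Chars.findFrom_natCast l [c] (i + 1) (by omega), hrest]
  have hb := PySem.Chars.neg_one_le_find rest [c]
  by_cases hr : PySem.Chars.find rest [c] = -1
  · simp [hr]
  · rw [if_neg hr, if_neg (by omega), if_neg hr]; push_cast; ring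

theorem toList_ofList_singleton (c : Char) : (String.ofList [c]).toList = [c] := by simp

-- Main loop correspondence: A's scan of the text from index i with idx_match m equals
-- B's find-cursor walk over the remaining substring characters starting at pos = i.
theorem strleft_loop_eq (sub : List Char) (text : String) :
    ∀ (tl : List Char) (i m : Nat), text.toList.drop i = tl → i ≤ text.toList.length →
      m < sub.length →
      strleftA_loop sub text tl i m =
        (match strleftB_loop text (sub.drop m) (i : Int) with
         | none => text
         | some pos => PySem.Str.slice text (some 0) (some (pos - (sub.length : Int)))) := by
  intro tl
  induction tl with
  | nil =>
    intro i m hdrop hi hm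
    have hsub : ∃ d r, sub.drop m = d :: r := by
      cases h : sub.drop m with
      | nil => exact absurd (List.drop_eq_nil_iff.mp h) (by omega)
      | cons d r => exact ⟨d, r, rfl⟩
    obtain ⟨d, r, hdr⟩ := hsub
    have hff : PySem.Chars.findFrom text.toList [d] (i : Int) = -1 :=
      findFrom_at_end text.toList d i hi hdrop
    simp only [strleftA_loop, strleftB_loop, hdr, PySem.Str.findFrom_eq,
      toList_ofList_singleton, hff]
    simp
  | cons c rest ih =>
    intro i m hdrop hi hm
    have hget : PySem.List.pyGet? sub (m : Int) = some sub[m] := by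
      rw [PySem.List.pyGet?_natCast]; exact List.getElem?_eq_getElem hm
    have hsubm : sub.drop m = sub[m] :: sub.drop (m + 1) := (List.getElem_cons_drop hm).symm
    have hlt : i < text.toList.length := by
      by_cases hge : text.toList.length ≤ i
      · rw [List.drop_eq_nil_of_le hge] at hdrop
        exact absurd hdrop (by simp)
      · omega
    have hrest : text.toList.drop (i + 1) = rest := by
      rw [← List.drop_drop, hdrop]; simp
    by_cases hc : c = sub[m]
    · have hff : PySem.Chars.findFrom text.toList [sub[m]] (i : Int) = (i : Int) :=
        findFrom_hit text.toList sub[m] i (by omega) rest (hc ▸ hdrop)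
      by_cases hdone : m + 1 ≥ sub.length
      · have hdropped : sub.drop (m + 1) = [] := List.drop_eq_nil_of_le hdone
        have hlen : m + 1 = sub.length := by omega
        simp only [strleftA_loop, hget, if_pos hc, if_pos hdone, strleftB_loop, hsubm,
          hdropped, PySem.Str.findFrom_eq, toList_ofList_singleton, hff,
          if_neg (by omega : ¬ (i : Int) = -1)]
        congr 2
        ring
      · have hrec := ih (i + 1) (m + 1) hrest (by omega) (by omega)
        simp only [strleftA_loop, hget, if_pos hc, if_neg hdone, strleftB_loop, hsubm,
          PySem.Str.findFrom_eq, toList_ofList_singleton, hff,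
          if_neg (by omega : ¬ (i : Int) = -1)]
        rw [hrec]
        norm_num
    · have hff : PySem.Chars.findFrom text.toList [sub[m]] (i : Int)
          = PySem.Chars.findFrom text.toList [sub[m]] ((i : Int) + 1) :=
        findFrom_skip text.toList sub[m] c i (by omega) rest hdrop hc
      have hrec := ih (i + 1) m hrest (by omega) hm
      simp only [strleftA_loop, hget, if_neg hc]
      rw [hrec]
      have hcast : ((i + 1 : Nat) : Int) = (i : Int) + 1 := by push_cast; ring
      simp only [hsubm, strleftB_loop, PySem.Str.findFrom_eq, toList_ofList_singleton,
        hcast, ← hff]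

-- ===== VERDICT (by name: the statement is the Claim_ definition above) =====
theorem strleft_spec : Claim_equal_strleft := by
  intro text substring _ hpre
  unfold Spec_strleft
  by_cases hs : substring = ""
  · subst hs
    have htext : text = "" := by
      rcases hpre with h | h
      · exact absurd rfl h
      · exact h
    subst htext
    decide
  · have hsub : 0 < substring.toList.length := by
      cases h : substring.toList with
      | nil => exact absurd (String.toList_eq_nil_iff.mp h) hs
      | cons a r => simp
    have := strleft_loop_eq substring.toList text text.toList 0 0
      (by simp) (by omega) hsub
    unfold strleft strleft_alt
    rw [this]
    simp
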